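-- pv_equiv track=rewrite | github.com/glad1olus86/evoliobot | handlers/cases.py | _group_by_pripad
-- ===== SOURCE A (Python) =====
-- def _group_by_pripad(cases_list: list[dict]) -> dict[str, list[dict]]:
--     """Seskupí záznamy podle idPripad, seřadí podle idUkol sestupně."""
--     groups: dict[str, list[dict]] = {}
--     for case in cases_list:
--         pid = str(case.get("idPripad", "unknown"))
--         groups.setdefault(pid, []).append(case)
--     for pid in groups:
--         groups[pid].sort(key=lambda x: int(x.get("idUkol", 0)), reverse=True)
--     return groups
-- ===== SOURCE B (Python) =====
-- def _group_by_pripad(cases_list: list[dict]) -> dict[str, list[dict]]: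
--     """One global stable sort by idUkol desc, then a single grouping pass;
--     bucket key order pre-seeded from the original list so the dict's key
--     order matches first occurrence in cases_list."""
--     ordered = sorted(cases_list, key=lambda c: int(c.get("idUkol", 0)), reverse=True)
--     groups = {str(c.get("idPripad", "unknown")): [] for c in cases_list}
--     for c in ordered:
--         groups[str(c.get("idPripad", "unknown"))].append(c)
--     return groups
-- ===== Notes on version B (the rewrite author's own statement) =====
-- stated objective: alternative
-- what changed: Instead of grouping first and then sorting each bucket separately, B performs one global stable sort of the whole list by idUkol descending and then a single grouping pass (with key order pre-seeded from the original list); stability of the sort makes each bucket come out identically ordered.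
import Mathlib
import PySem

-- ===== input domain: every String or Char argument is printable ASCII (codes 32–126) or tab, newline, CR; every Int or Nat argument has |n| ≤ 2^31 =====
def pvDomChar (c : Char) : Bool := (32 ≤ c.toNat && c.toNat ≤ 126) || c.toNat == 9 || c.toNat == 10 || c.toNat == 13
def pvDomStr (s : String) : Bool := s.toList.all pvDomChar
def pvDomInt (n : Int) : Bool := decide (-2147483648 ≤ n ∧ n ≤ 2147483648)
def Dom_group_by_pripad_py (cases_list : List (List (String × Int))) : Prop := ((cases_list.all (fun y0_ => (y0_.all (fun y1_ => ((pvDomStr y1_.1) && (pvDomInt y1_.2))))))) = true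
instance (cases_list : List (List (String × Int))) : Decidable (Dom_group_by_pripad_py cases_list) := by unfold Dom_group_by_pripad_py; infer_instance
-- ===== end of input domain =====

-- B replaces A's group-then-sort-each-bucket by one global stable sort followed by a single
-- grouping pass (key order pre-seeded from the original list); same return value, similar cost.

-- shared helpers: the inline Python expressions str(case.get("idPripad", "unknown"))
-- and int(case.get("idUkol", 0)) (the dict values are already ints)
def pidOf (case : List (String × Int)) : String :=
  match (PySem.Dict.mk case).get? "idPripad" with
  | some v => PySem.Int.toStr v
  | none => "unknown"

def ukolOf (case : List (String × Int)) : Int :=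
  (PySem.Dict.mk case).getD "idUkol" 0

-- ===== PORT A =====
def group_by_pripad_py (cases_list : List (List (String × Int))) : List (String × List (List (String × Int))) :=
  -- groups = {}; for case: groups.setdefault(pid, []).append(case)
  let groups : PySem.Dict String (List (List (String × Int))) :=
    cases_list.foldl (fun groups case =>
      let pid := pidOf case
      (groups.setdefault pid []).modify pid [] (fun l => l ++ [case])) PySem.Dict.empty
  -- for pid in groups: groups[pid].sort(key=..., reverse=True)
  let groups :=
    groups.keys.foldl (fun g pid => g.modify pid [] (fun l => PySem.List.sorted l ukolOf true)) groups
  groups.items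

-- ===== PORT B =====
def group_by_pripad_py_alt (cases_list : List (List (String × Int))) : List (String × List (List (String × Int))) :=
  -- ordered = sorted(cases_list, key=lambda c: int(c.get("idUkol", 0)), reverse=True)
  let ordered := PySem.List.sorted cases_list ukolOf true
  -- groups = {str(c.get("idPripad", "unknown")): [] for c in cases_list}
  let groups : PySem.Dict String (List (List (String × Int))) :=
    cases_list.foldl (fun g case => g.insert (pidOf case) []) PySem.Dict.empty
  -- for c in ordered: groups[pid].append(c)   (pid is always a key of groups, so the
  -- modify-with-default-[] below is exact: the default branch is never taken)
  let groups :=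
    ordered.foldl (fun g case => g.modify (pidOf case) [] (fun l => l ++ [case])) groups
  groups.items

-- ===== PRECONDITION & SPEC =====
def Spec_group_by_pripad_py (cases_list : List (List (String × Int))) (out : List (String × List (List (String × Int)))) : Prop := out = group_by_pripad_py_alt cases_list
instance (cases_list : List (List (String × Int))) (out : List (String × List (List (String × Int)))) : Decidable (Spec_group_by_pripad_py cases_list out) := by unfold Spec_group_by_pripad_py; infer_instance

-- ===== CLAIM (what is proved, stated in full; the proofs are below) =====
def Claim_equal_group_by_pripad_py : Prop := ∀ (cases_list : List (List (String × Int))), Dom_group_by_pripad_py cases_list → Spec_group_by_pripad_py cases_list (group_by_pripad_py cases_list)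

-- ===== LEMMAS AND PROOFS =====

-- adding only elements already present leaves a Set unchanged
lemma set_update_of_forall_mem {α : Type} [BEq α] [LawfulBEq α] :
    ∀ (l s : List α), (∀ x ∈ l, x ∈ s) → PySem.Set.update s l = s := by
  intro l
  induction l with
  | nil => intro s _; rfl
  | cons x t ih =>
    intro s h
    have hx : PySem.Set.add s x = s := by simp [PySem.Set.add, h x (by simp)]
    have hstep : PySem.Set.update s (x :: t) = PySem.Set.update (PySem.Set.add s x) t := rfl
    rw [hstep, hx]
    exact ih s (fun y hy => h y (by simp [hy]))

-- setdefault followed by a modify at the same key is just the modify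
lemma setdefault_modify {κ ν : Type} [BEq κ] [LawfulBEq κ]
    (d : PySem.Dict κ ν) (k : κ) (v : ν) (f : ν → ν) :
    (d.setdefault k v).modify k v f = d.modify k v f := by
  by_cases h : d.contains k = true
  · rw [PySem.Dict.setdefault_of_contains d v h]
  · have h' : d.contains k = false := by simpa using h
    rw [PySem.Dict.setdefault_of_not_contains d v h']
    simp [PySem.Dict.modify, PySem.Dict.getD_insert_self, PySem.Dict.insert_insert_self,
      PySem.Dict.getD_of_not_contains d v h']

-- looking up after a fold of modifies over a Nodup key list
lemma getD_foldl_modify_nodup {κ ν : Type} [BEq κ] [LawfulBEq κ] (g : ν → ν) (d0 : ν) :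
    ∀ (l : List κ) (d : PySem.Dict κ ν), l.Nodup → ∀ p,
      (l.foldl (fun d k => d.modify k d0 g) d).getD p d0 =
        if p ∈ l then g (d.getD p d0) else d.getD p d0 := by
  intro l
  induction l with
  | nil => intro d _ p; simp
  | cons k t ih =>
    intro d hnd p
    simp only [List.foldl_cons]
    rw [ih (d.modify k d0 g) hnd.of_cons p]
    by_cases hpt : p ∈ t
    · have hpk : p ≠ k := fun h => (List.nodup_cons.mp hnd).1 (h ▸ hpt)
      simp only [hpt, if_true, List.mem_cons, or_true]
      rw [PySem.Dict.modify, PySem.Dict.getD_insert_of_ne _ _ _ hpk]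
    · by_cases hpk : p = k
      · subst hpk
        simp only [hpt, if_false, List.mem_cons, true_or, if_true]
        rw [PySem.Dict.modify, PySem.Dict.getD_insert_self]
      · simp only [hpt, if_false, List.mem_cons, hpk, false_or]
        rw [PySem.Dict.modify, PySem.Dict.getD_insert_of_ne _ _ _ hpk]

-- every value of a dict built by inserting only [] is []
lemma getD_foldl_insert_nil {κ : Type} [BEq κ] [LawfulBEq κ] {β γ : Type} (keyf : β → κ) :
    ∀ (l : List β) (d : PySem.Dict κ (List γ)), (∀ p, d.getD p [] = []) → ∀ p,
      (l.foldl (fun g x => g.insert (keyf x) []) d).getD p [] = [] := by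
  intro l
  induction l with
  | nil => intro d h p; exact h p
  | cons x t ih =>
    intro d h p
    simp only [List.foldl_cons]
    refine ih _ (fun q => ?_) p
    by_cases hq : q = keyf x
    · subst hq; rw [PySem.Dict.getD_insert_self]
    · rw [PySem.Dict.getD_insert_of_ne _ _ _ hq]; exact h q

-- looking up after a fold of append-modifies keyed by a function of the element
lemma getD_foldl_modify_append_key {κ : Type} [BEq κ] [LawfulBEq κ] {β : Type} (keyf : β → κ) :
    ∀ (l : List β) (d : PySem.Dict κ (List β)) (c : κ),
      (l.foldl (fun d x => d.modify (keyf x) [] (fun v => v ++ [x])) d).getD c [] =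
        d.getD c [] ++ l.filter (fun x => keyf x == c) := by
  intro l
  induction l with
  | nil => intro d c; simp
  | cons x t ih =>
    intro d c
    simp only [List.foldl_cons]
    rw [ih]
    by_cases hc : c = keyf x
    · subst hc
      rw [PySem.Dict.modify, PySem.Dict.getD_insert_self,
        List.filter_cons_of_pos (by simp), List.append_assoc]
      rfl
    · rw [PySem.Dict.modify, PySem.Dict.getD_insert_of_ne _ _ _ hc,
        List.filter_cons_of_neg (by simp; exact fun h => hc h.symm)]

-- ===== stability of the reverse sort under filter =====

-- inserting an element whose key beats every element of ys puts it in front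
lemma insertBy_of_forall_lt {α : Type} (key : α → Int) (x : α) :
    ∀ (ys : List α), (∀ y ∈ ys, key y < key x) →
      PySem.List.insertBy (fun a b => decide (key b < key a)) x ys = x :: ys := by
  intro ys h
  cases ys with
  | nil => rfl
  | cons a t => simp [PySem.List.insertBy, h a (by simp)]

-- insertBy keeps the descending-by-key order
lemma pairwise_insertBy {α : Type} (key : α → Int) (x : α) :
    ∀ (ys : List α), ys.Pairwise (fun a b => key b ≤ key a) →
      (PySem.List.insertBy (fun a b => decide (key b < key a)) x ys).Pairwise
        (fun a b => key b ≤ key a) := by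
  intro ys
  induction ys with
  | nil => intro _; simp [PySem.List.insertBy]
  | cons a t ih =>
    intro h
    rw [List.pairwise_cons] at h
    by_cases hx : key a < key x
    · have h1 : PySem.List.insertBy (fun a b => decide (key b < key a)) x (a :: t)
          = x :: a :: t := by simp [PySem.List.insertBy, hx]
      rw [h1]
      refine List.Pairwise.cons ?_ (List.Pairwise.cons h.1 h.2)
      intro y hy
      rcases List.mem_cons.mp hy with rfl | hyt
      · exact le_of_lt hx
      · exact le_trans (h.1 y hyt) (le_of_lt hx)
    · have h1 : PySem.List.insertBy (fun a b => decide (key b < key a)) x (a :: t)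
          = a :: PySem.List.insertBy (fun a b => decide (key b < key a)) x t := by
        simp [PySem.List.insertBy, hx]
      rw [h1]
      refine List.Pairwise.cons ?_ (ih h.2)
      intro y hy
      rcases (PySem.List.mem_insertBy _ _ _ _).mp hy with rfl | hyt
      · exact le_of_not_gt hx
      · exact h.1 y hyt

-- filtering commutes with a single stable insertion into a descending list
lemma filter_insertBy {α : Type} (key : α → Int) (q : α → Bool) (x : α) :
    ∀ (ys : List α), ys.Pairwise (fun a b => key b ≤ key a) →
      (PySem.List.insertBy (fun a b => decide (key b < key a)) x ys).filter q =
        if q x then PySem.List.insertBy (fun a b => decide (key b < key a)) x (ys.filter q)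
        else ys.filter q := by
  intro ys
  induction ys with
  | nil => intro _; by_cases hqx : q x <;> simp [PySem.List.insertBy, hqx]
  | cons a t ih =>
    intro h
    rw [List.pairwise_cons] at h
    by_cases hx : key a < key x
    · have h1 : PySem.List.insertBy (fun a b => decide (key b < key a)) x (a :: t)
          = x :: a :: t := by simp [PySem.List.insertBy, hx]
      rw [h1]
      by_cases hqa : q a
      · by_cases hqx : q x
        · have h3 : PySem.List.insertBy (fun a b => decide (key b < key a)) x (a :: t.filter q)
              = x :: a :: t.filter q := by simp [PySem.List.insertBy, hx]
          simp [hqx, hqa, h3]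
        · simp [hqx, hqa]
      · by_cases hqx : q x
        · have h3 : PySem.List.insertBy (fun a b => decide (key b < key a)) x (t.filter q)
              = x :: t.filter q :=
            insertBy_of_forall_lt key x _
              (fun y hy => lt_of_le_of_lt (h.1 y (List.mem_of_mem_filter hy)) hx)
          simp [hqx, hqa, h3]
        · simp [hqx, hqa]
    · have h1 : PySem.List.insertBy (fun a b => decide (key b < key a)) x (a :: t)
          = a :: PySem.List.insertBy (fun a b => decide (key b < key a)) x t := by
        simp [PySem.List.insertBy, hx]
      rw [h1]
      by_cases hqa : q a
      · by_cases hqx : q x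
        · have h3 : PySem.List.insertBy (fun a b => decide (key b < key a)) x (a :: t.filter q)
              = a :: PySem.List.insertBy (fun a b => decide (key b < key a)) x (t.filter q) := by
            simp [PySem.List.insertBy, hx]
          simp [hqa, hqx, ih h.2, h3]
        · simp [hqa, hqx, ih h.2]
      · simp [hqa, ih h.2]

-- filtering commutes with the whole insertion-sort fold
lemma filter_foldl_insertBy {α : Type} (key : α → Int) (q : α → Bool) :
    ∀ (xs acc : List α), acc.Pairwise (fun a b => key b ≤ key a) →
      (xs.foldl (fun acc x => PySem.List.insertBy (fun a b => decide (key b < key a)) x acc) acc).filter q =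
        (xs.filter q).foldl
          (fun acc x => PySem.List.insertBy (fun a b => decide (key b < key a)) x acc) (acc.filter q) := by
  intro xs
  induction xs with
  | nil => intro acc _; rfl
  | cons x t ih =>
    intro acc h
    simp only [List.foldl_cons]
    rw [ih _ (pairwise_insertBy key x acc h), filter_insertBy key q x acc h]
    by_cases hqx : q x
    · simp [hqx]
    · simp [hqx]

-- Python's sort is stable: filtering before or after sorted(..., reverse=True) agree
lemma sorted_rev_filter {α : Type} (key : α → Int) (q : α → Bool) (xs : List α) :
    (PySem.List.sorted xs key true).filter q = PySem.List.sorted (xs.filter q) key true := by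
  rw [PySem.List.sorted_rev_eq_foldl_insertBy, PySem.List.sorted_rev_eq_foldl_insertBy]
  simpa using filter_foldl_insertBy key q xs [] (by simp)

-- ===== characterizations of the two ports =====

lemma portA_items (cases_list : List (List (String × Int))) :
    group_by_pripad_py cases_list =
      (PySem.Set.ofList (cases_list.map pidOf)).map
        (fun p => (p, PySem.List.sorted (cases_list.filter (fun c => pidOf c == p)) ukolOf true)) := by
  unfold group_by_pripad_py
  simp only [setdefault_modify]
  set G1 := cases_list.foldl
    (fun d c => d.modify (pidOf c) [] (fun l => l ++ [c])) PySem.Dict.empty with hG1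
  have hk1 : G1.keys = PySem.Set.ofList (cases_list.map pidOf) := by
    rw [hG1, PySem.Dict.keys_foldl_modify_key cases_list pidOf [] (fun _ c => fun l => l ++ [c])]
    rfl
  have hnd1 : G1.keys.Nodup := by
    rw [hG1]
    exact PySem.Dict.nodup_keys_foldl_modify_key _ _ _ _ _ (by simp [PySem.Dict.empty, PySem.Dict.keys])
  have hg1 : ∀ p, G1.getD p [] = cases_list.filter (fun c => pidOf c == p) := by
    intro p
    rw [hG1, getD_foldl_modify_append_key pidOf cases_list PySem.Dict.empty p]
    simp
  set G2 := G1.keys.foldl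
    (fun g pid => g.modify pid [] (fun l => PySem.List.sorted l ukolOf true)) G1 with hG2
  have hk2 : G2.keys = G1.keys := by
    rw [hG2, PySem.Dict.keys_foldl_modify_key G1.keys (fun x => x) []
      (fun _ _ => fun l => PySem.List.sorted l ukolOf true), List.map_id']
    exact set_update_of_forall_mem _ _ (fun x hx => hx)
  have hnd2 : G2.keys.Nodup := hk2 ▸ hnd1
  have hg2 : ∀ p ∈ G1.keys, G2.getD p [] =
      PySem.List.sorted (cases_list.filter (fun c => pidOf c == p)) ukolOf true := by
    intro p hp
    rw [hG2, getD_foldl_modify_nodup _ _ _ _ hnd1 p, if_pos hp, hg1 p]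
  rw [PySem.Dict.items_eq_map_keys G2 hnd2 [], hk2, hk1]
  exact List.map_congr_left (fun p hp => by rw [hg2 p (hk1 ▸ hp)])

lemma portB_items (cases_list : List (List (String × Int))) :
    group_by_pripad_py_alt cases_list =
      (PySem.Set.ofList (cases_list.map pidOf)).map
        (fun p => (p, (PySem.List.sorted cases_list ukolOf true).filter (fun c => pidOf c == p))) := by
  unfold group_by_pripad_py_alt
  set ordered := PySem.List.sorted cases_list ukolOf true with hord
  set H1 := cases_list.foldl (fun g c => g.insert (pidOf c) []) PySem.Dict.empty with hH1
  have hk1 : H1.keys = PySem.Set.ofList (cases_list.map pidOf) := by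
    rw [hH1, PySem.Dict.keys_foldl_insert_key cases_list pidOf (fun _ _ => [])]
    rfl
  have hnd1 : H1.keys.Nodup := by
    rw [hH1]
    exact PySem.Dict.nodup_keys_foldl_insert_key _ _ _ _ (by simp [PySem.Dict.empty, PySem.Dict.keys])
  have hg1 : ∀ p, H1.getD p [] = [] := by
    intro p
    rw [hH1]
    exact getD_foldl_insert_nil pidOf cases_list PySem.Dict.empty (fun q => by simp) p
  set H2 := ordered.foldl (fun g c => g.modify (pidOf c) [] (fun l => l ++ [c])) H1 with hH2
  have hmemord : ∀ x ∈ ordered.map pidOf, x ∈ H1.keys := by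
    intro x hx
    rcases List.mem_map.mp hx with ⟨c, hc, rfl⟩
    rw [hk1]
    exact (PySem.Set.mem_ofList _ _).mpr
      (List.mem_map.mpr ⟨c, (PySem.List.sorted_perm cases_list ukolOf true).mem_iff.mp hc, rfl⟩)
  have hk2 : H2.keys = H1.keys := by
    rw [hH2, PySem.Dict.keys_foldl_modify_key ordered pidOf [] (fun _ c => fun l => l ++ [c])]
    exact set_update_of_forall_mem _ _ hmemord
  have hnd2 : H2.keys.Nodup := hk2 ▸ hnd1
  have hg2 : ∀ p, H2.getD p [] = ordered.filter (fun c => pidOf c == p) := by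
    intro p
    rw [hH2, getD_foldl_modify_append_key pidOf ordered H1 p, hg1 p]
    simp
  rw [PySem.Dict.items_eq_map_keys H2 hnd2 [], hk2, hk1]
  exact List.map_congr_left (fun p hp => by rw [hg2 p])

-- ===== VERDICT (by name: the statement is the Claim_ definition above) =====
theorem group_by_pripad_py_spec : Claim_equal_group_by_pripad_py := by
  intro cases_list _
  show group_by_pripad_py cases_list = group_by_pripad_py_alt cases_list
  rw [portA_items, portB_items]
  exact List.map_congr_left (fun p _ => by rw [sorted_rev_filter])
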